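-- pv_equiv track=rewrite | github.com/gamegraphgym/ggg | extra/scripts/pgsolver_to_ggg.py | _unescape_pgsolver_string
-- ===== SOURCE A (Python) =====
-- from typing import Dict, Iterable, List, Sequence, Tuple
--
-- def _unescape_pgsolver_string(s: str) -> str:
--     """Unescape only the pgsolver string escapes we intentionally support."""
--     out: List[str] = []
--     i = 0
--     while i < len(s):
--         ch = s[i]
--         if ch == "\\" and i + 1 < len(s):
--             nxt = s[i + 1]
--             if nxt == "\\" or nxt == '"':
--                 out.append(nxt)
--                 i += 2
--                 continue
--         out.append(ch)
--         i += 1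
--     return "".join(out)
-- ===== SOURCE B (Python) =====
-- from typing import List
--
--
-- def _unescape_pgsolver_string(s: str) -> str:
--     """Unescape only the pgsolver string escapes we intentionally support.
--
--     Single forward pass as a two-state machine: instead of an index cursor
--     with one-character lookahead, remember whether a backslash is pending.
--     """
--     out: List[str] = []
--     pending = False  # an unconsumed backslash was seen
--     for ch in s:
--         if pending:
--             if ch == "\\" or ch == '"':
--                 out.append(ch)
--             else:
--                 out.append("\\")
--                 out.append(ch)
--             pending = False
--         elif ch == "\\":
--             pending = True
--         else:
--             out.append(ch)
--     if pending:
--         out.append("\\")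
--     return "".join(out)
-- ===== Notes on version B (the rewrite author's own statement) =====
-- stated objective: alternative
-- what changed: Replaced the index-cursor loop with one-character lookahead and two-step consumption by a single for-each pass over the characters driven by a two-state machine (a 'pending backslash' flag) with a final flush of a trailing lone backslash; avoiding per-character indexing gives a constant-factor speedup.
import Mathlib
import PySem

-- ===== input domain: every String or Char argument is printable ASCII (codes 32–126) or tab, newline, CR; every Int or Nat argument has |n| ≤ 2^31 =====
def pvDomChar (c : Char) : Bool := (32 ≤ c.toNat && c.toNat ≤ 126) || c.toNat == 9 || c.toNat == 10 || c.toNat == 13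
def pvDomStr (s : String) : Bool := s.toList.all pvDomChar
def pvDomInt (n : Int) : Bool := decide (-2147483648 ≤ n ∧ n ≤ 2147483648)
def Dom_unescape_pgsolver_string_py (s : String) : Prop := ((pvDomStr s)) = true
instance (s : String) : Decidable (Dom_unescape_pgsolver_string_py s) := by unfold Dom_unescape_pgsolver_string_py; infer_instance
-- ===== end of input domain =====

-- B replaces A's index cursor with one-character lookahead by a single for-each
-- pass driven by a 'pending backslash' flag (objective: alternative; same O(n) cost).


-- ===== PORT A =====
-- A's while loop: index i, one-character lookahead, `continue` after consuming two
-- characters; `out` accumulates the emitted (single-character) strings, joined at the end.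
def pvAGo (cs : List Char) (i : Nat) (out : List Char) : List Char :=
  if _h : i < cs.length then
    let ch := cs[i]!
    if ch = '\\' ∧ i + 1 < cs.length then
      let nxt := cs[i + 1]!
      if nxt = '\\' ∨ nxt = '"' then
        pvAGo cs (i + 2) (out ++ [nxt])
      else
        pvAGo cs (i + 1) (out ++ [ch])
    else
      pvAGo cs (i + 1) (out ++ [ch])
  else out
termination_by cs.length - i

def unescape_pgsolver_string_py (s : String) : String :=
  String.ofList (pvAGo s.toList 0 [])

-- ===== PORT B =====
-- B's for-each pass: state = (out, pending); flush a trailing pending backslash.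
def pvBStep (st : List Char × Bool) (ch : Char) : List Char × Bool :=
  if st.2 then
    if ch = '\\' ∨ ch = '"' then (st.1 ++ [ch], false)
    else (st.1 ++ ['\\', ch], false)
  else if ch = '\\' then (st.1, true)
  else (st.1 ++ [ch], false)

def unescape_pgsolver_string_py_alt (s : String) : String :=
  let r := s.toList.foldl pvBStep ([], false)
  String.ofList (if r.2 then r.1 ++ ['\\'] else r.1)

-- ===== PRECONDITION & SPEC =====
def Spec_unescape_pgsolver_string_py (s : String) (out : String) : Prop := out = unescape_pgsolver_string_py_alt s
instance (s : String) (out : String) : Decidable (Spec_unescape_pgsolver_string_py s out) := by unfold Spec_unescape_pgsolver_string_py; infer_instance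

-- ===== CLAIM (what is proved, stated in full; the proofs are below) =====
def Claim_equal_unescape_pgsolver_string_py : Prop := ∀ (s : String), Dom_unescape_pgsolver_string_py s → Spec_unescape_pgsolver_string_py s (unescape_pgsolver_string_py s)

-- ===== LEMMAS AND PROOFS =====

-- canonical form: structural two-character recursion both ports are reduced to
def pvF : List Char → List Char
  | [] => []
  | [a] => [a]
  | a :: b :: r =>
    if a = '\\' ∧ (b = '\\' ∨ b = '"') then b :: pvF r else a :: pvF (b :: r)

lemma pvF_cons_ne (a : Char) (rest : List Char) (ha : a ≠ '\\') :
    pvF (a :: rest) = a :: pvF rest := by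
  cases rest with
  | nil => rfl
  | cons b r => simp [pvF, ha]

lemma pvF_pair (a b : Char) (r : List Char) (h : a = '\\' ∧ (b = '\\' ∨ b = '"')) :
    pvF (a :: b :: r) = b :: pvF r := by simp [pvF, h]

lemma pvF_pair_ne (a b : Char) (r : List Char) (h : ¬ (a = '\\' ∧ (b = '\\' ∨ b = '"'))) :
    pvF (a :: b :: r) = a :: pvF (b :: r) := by simp [pvF, h]

lemma pvAGo_eq (n : Nat) : ∀ (cs : List Char) (i : Nat) (out : List Char),
    cs.length - i ≤ n → pvAGo cs i out = out ++ pvF (cs.drop i) := by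
  induction n with
  | zero =>
    intro cs i out h
    have hle : cs.length ≤ i := by omega
    rw [pvAGo, dif_neg (by omega), List.drop_eq_nil_of_le hle]
    simp [pvF]
  | succ n ih =>
    intro cs i out h
    rw [pvAGo]
    by_cases hi : i < cs.length
    · rw [dif_pos hi]
      simp only [getElem!_pos cs i hi]
      have hdrop : cs.drop i = cs[i] :: cs.drop (i + 1) := List.drop_eq_getElem_cons hi
      by_cases h2 : cs[i] = '\\' ∧ i + 1 < cs.length
      · rw [if_pos h2]
        simp only [getElem!_pos cs (i + 1) h2.2]
        have hdrop2 : cs.drop (i + 1) = cs[i + 1] :: cs.drop (i + 2) :=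
          List.drop_eq_getElem_cons h2.2
        by_cases hg : cs[i + 1] = '\\' ∨ cs[i + 1] = '"'
        · rw [if_pos hg, ih cs (i + 2) _ (by omega), hdrop, hdrop2,
            pvF_pair _ _ _ ⟨h2.1, hg⟩]
          simp
        · rw [if_neg hg, ih cs (i + 1) _ (by omega), hdrop, hdrop2,
            pvF_pair_ne _ _ _ (fun hc => hg hc.2), ← hdrop2]
          simp
      · rw [if_neg h2, ih cs (i + 1) _ (by omega), hdrop]
        by_cases hbs : cs[i] = '\\'
        · have hnil : cs.drop (i + 1) = [] := by
            apply List.drop_eq_nil_of_le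
            rcases Nat.lt_or_ge (i + 1) cs.length with hlt | hge
            · exact absurd ⟨hbs, hlt⟩ h2
            · omega
          rw [hnil]
          simp [pvF]
        · rw [pvF_cons_ne _ _ hbs]
          simp
    · rw [dif_neg hi, List.drop_eq_nil_of_le (by omega)]
      simp [pvF]

-- B's fold: both states, simultaneously, by one induction on the character list
lemma pvBFold_eq (cs : List Char) : ∀ (out : List Char),
    (let r := cs.foldl pvBStep (out, false)
     (if r.2 then r.1 ++ ['\\'] else r.1)) = out ++ pvF cs ∧
    (let r := cs.foldl pvBStep (out, true)
     (if r.2 then r.1 ++ ['\\'] else r.1)) = out ++ pvF ('\\' :: cs) := by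
  induction cs with
  | nil => intro out; simp [pvF]
  | cons c r ih =>
    intro out
    constructor
    · by_cases hc : c = '\\'
      · subst hc
        simpa [pvBStep] using (ih out).2
      · have := (ih (out ++ [c])).1
        simp only [List.foldl_cons, pvBStep, if_neg hc] at this ⊢
        simp [this, pvF_cons_ne c r hc]
    · by_cases hg : c = '\\' ∨ c = '"'
      · have := (ih (out ++ [c])).1
        simp only [List.foldl_cons, pvBStep, if_pos hg, if_true] at this ⊢
        have hf : pvF ('\\' :: c :: r) = c :: pvF r := by simp [pvF, hg]
        simp [this, hf]
      · have hc : c ≠ '\\' := fun h => hg (Or.inl h)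
        have := (ih (out ++ ['\\', c])).1
        simp only [List.foldl_cons, pvBStep, if_neg hg, if_true] at this ⊢
        have hf : pvF ('\\' :: c :: r) = '\\' :: c :: pvF r := by
          simp [pvF, hg, pvF_cons_ne c r hc]
        simp [this, hf]

-- ===== VERDICT (by name: the statement is the Claim_ definition above) =====
theorem unescape_pgsolver_string_py_spec : Claim_equal_unescape_pgsolver_string_py := by
  intro s _
  unfold Spec_unescape_pgsolver_string_py unescape_pgsolver_string_py unescape_pgsolver_string_py_alt
  rw [pvAGo_eq s.toList.length s.toList 0 [] (by omega)]
  have := (pvBFold_eq s.toList []).1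
  simp only [List.drop_zero, List.nil_append] at *
  rw [this]
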